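-- pv_equiv track=rewrite | github.com/mashuangwe/NER | utils.py | get_LOC_entity
-- ===== SOURCE A (Python) =====
-- def get_LOC_entity(tag_seq, char_seq):
--     LOC, temp = [], []
--     for tag, char in zip(tag_seq, char_seq):
--         if tag == 'B_LOC' or tag == 'I_LOC':
--             temp.append(char)
--         elif temp:
--             LOC.append(''.join(temp))
--             temp = []
--     if temp:
--         LOC.append(''.join(temp))
--     return LOC
-- ===== SOURCE B (Python) =====
-- def _is_loc(tag):
--     return tag == 'B_LOC' or tag == 'I_LOC'
--
--
-- def get_LOC_entity(tag_seq, char_seq):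
--     pairs = list(zip(tag_seq, char_seq))
--     res = []
--     i, n = 0, len(pairs)
--     while i < n:
--         if _is_loc(pairs[i][0]):
--             j = i + 1
--             while j < n and _is_loc(pairs[j][0]):
--                 j += 1
--             res.append(''.join(c for _, c in pairs[i:j]))
--             i = j
--         else:
--             i += 1
--     return res
-- ===== Notes on version B (the rewrite author's own statement) =====
-- stated objective: alternative
-- what changed: Replaces A's single-pass state machine (pending-chunk accumulator plus trailing flush) by a span scan: find each maximal run of LOC tags with an inner index scan, join that slice, and jump past it; no carried accumulator, no post-loop flush branch.
import Mathlib
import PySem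

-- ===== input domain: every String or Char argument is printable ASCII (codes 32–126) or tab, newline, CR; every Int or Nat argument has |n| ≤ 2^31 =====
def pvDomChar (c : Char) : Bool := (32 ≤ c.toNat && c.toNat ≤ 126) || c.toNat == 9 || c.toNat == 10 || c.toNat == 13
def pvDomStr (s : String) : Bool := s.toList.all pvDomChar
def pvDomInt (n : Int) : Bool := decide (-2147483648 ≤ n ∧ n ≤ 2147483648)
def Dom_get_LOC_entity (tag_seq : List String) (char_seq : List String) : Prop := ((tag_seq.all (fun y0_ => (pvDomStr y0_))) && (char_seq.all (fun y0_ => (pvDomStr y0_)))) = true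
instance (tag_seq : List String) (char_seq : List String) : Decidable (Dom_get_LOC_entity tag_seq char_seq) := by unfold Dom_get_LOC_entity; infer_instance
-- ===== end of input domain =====

-- B replaces A's accumulator state machine by a span scan over maximal LOC runs (alternative decomposition; return value only).

-- ===== PORT A =====
-- one step of A's for-loop over zip(tag_seq, char_seq), state = (LOC, temp)
def pvStepA (st : List String × List String) (p : String × String) : List String × List String :=
  if p.1 == "B_LOC" || p.1 == "I_LOC" then (st.1, st.2 ++ [p.2])
  else if st.2 ≠ [] then (st.1 ++ [PySem.Str.join "" st.2], [])
  else st

def get_LOC_entity (tag_seq : List String) (char_seq : List String) : List String :=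
  let st := (tag_seq.zip char_seq).foldl pvStepA ([], [])
  if st.2 ≠ [] then st.1 ++ [PySem.Str.join "" st.2] else st.1

-- ===== PORT B =====
-- tag == 'B_LOC' or tag == 'I_LOC'
def pvIsLoc (p : String × String) : Bool := p.1 == "B_LOC" || p.1 == "I_LOC"

-- the outer while-loop of Source B: at a LOC position, the inner loop scans the maximal run
-- (takeWhile/dropWhile = the inner index scan j and the jump i := j), joins it, and continues after it
def pvAltGo : List (String × String) → List String
  | [] => []
  | p :: rest =>
    if pvIsLoc p then
      PySem.Str.join "" (p.2 :: (rest.takeWhile pvIsLoc).map Prod.snd)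
        :: pvAltGo (rest.dropWhile pvIsLoc)
    else pvAltGo rest
termination_by l => l.length
decreasing_by
  · exact Nat.lt_succ_of_le (List.length_dropWhile_le _ _)
  · simp

def get_LOC_entity_alt (tag_seq : List String) (char_seq : List String) : List String :=
  pvAltGo (tag_seq.zip char_seq)

-- ===== PRECONDITION & SPEC =====
def Spec_get_LOC_entity (tag_seq : List String) (char_seq : List String) (out : List String) : Prop := out = get_LOC_entity_alt tag_seq char_seq
instance (tag_seq : List String) (char_seq : List String) (out : List String) : Decidable (Spec_get_LOC_entity tag_seq char_seq out) := by unfold Spec_get_LOC_entity; infer_instance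

-- ===== CLAIM (what is proved, stated in full; the proofs are below) =====
def Claim_equal_get_LOC_entity : Prop := ∀ (tag_seq : List String) (char_seq : List String), Dom_get_LOC_entity tag_seq char_seq → Spec_get_LOC_entity tag_seq char_seq (get_LOC_entity tag_seq char_seq)

-- ===== LEMMAS AND PROOFS =====

-- A's result with a carried pending chunk `temp`, as B-side chunks
def pvGoC (temp : List String) (l : List (String × String)) : List String :=
  match temp with
  | [] => pvAltGo l
  | _ =>
    PySem.Str.join "" (temp ++ (l.takeWhile pvIsLoc).map Prod.snd)
      :: pvAltGo (l.dropWhile pvIsLoc)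

def pvFinA (st : List String × List String) : List String :=
  if st.2 ≠ [] then st.1 ++ [PySem.Str.join "" st.2] else st.1

theorem pvFinA_cons (s : String) (st : List String × List String) :
    pvFinA (s :: st.1, st.2) = s :: pvFinA st := by
  unfold pvFinA; split_ifs <;> simp

-- the finished LOC prefix only accumulates: it factors out of the fold
theorem pvFoldA_acc (l : List (String × String)) (LOC temp : List String) :
    l.foldl pvStepA (LOC, temp)
      = (LOC ++ (l.foldl pvStepA ([], temp)).1, (l.foldl pvStepA ([], temp)).2) := by
  induction l generalizing LOC temp with
  | nil => simp
  | cons p rest ih =>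
    simp only [List.foldl_cons]
    by_cases h : pvIsLoc p
    · simp only [pvStepA, pvIsLoc] at h ⊢
      rw [h]; simp only [if_true]
      exact ih LOC (temp ++ [p.2])
    · simp only [pvIsLoc] at h
      simp only [pvStepA, h, if_neg, Bool.false_eq_true, not_false_eq_true]
      by_cases ht : temp = []
      · subst ht; simp only [ne_eq, not_true_eq_false, if_neg, not_false_eq_true]
        exact ih LOC []
      · simp only [ne_eq, ht, not_false_eq_true, if_pos]
        rw [ih (LOC ++ [PySem.Str.join "" temp]) []]
        conv_rhs => rw [ih ([] ++ [PySem.Str.join "" temp]) []]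
        simp

theorem pvFoldA_goC (l : List (String × String)) (temp : List String) :
    pvFinA (l.foldl pvStepA ([], temp)) = pvGoC temp l := by
  induction l generalizing temp with
  | nil =>
    cases temp with
    | nil => simp [pvFinA, pvGoC, pvAltGo]
    | cons a t => simp [pvFinA, pvGoC, pvAltGo]
  | cons p rest ih =>
    simp only [List.foldl_cons]
    by_cases h : pvIsLoc p
    · have hstep : pvStepA ([], temp) p = ([], temp ++ [p.2]) := by
        simp only [pvStepA, pvIsLoc] at h ⊢; rw [h]; simp
      rw [hstep, ih (temp ++ [p.2])]
      cases temp with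
      | nil =>
        cases htw : rest.takeWhile pvIsLoc <;>
          simp [pvGoC, pvAltGo, h, htw]
      | cons a t =>
        simp [pvGoC, h]
    · have hb : (p.1 == "B_LOC" || p.1 == "I_LOC") = false := by
        simpa [pvIsLoc] using h
      cases temp with
      | nil =>
        have hstep : pvStepA ([], ([] : List String)) p = ([], []) := by
          simp [pvStepA, hb]
        rw [hstep, ih []]
        simp [pvGoC, pvAltGo, h]
      | cons a t =>
        have hstep : pvStepA (([] : List String), a :: t) p
            = ([PySem.Str.join "" (a :: t)], []) := by
          simp [pvStepA, hb]
        rw [hstep, pvFoldA_acc]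
        have hsingle : [PySem.Str.join "" (a :: t)] ++ (List.foldl pvStepA ([], []) rest).1
            = PySem.Str.join "" (a :: t) :: (List.foldl pvStepA ([], []) rest).1 := by simp
        rw [hsingle, pvFinA_cons, ih []]
        simp [pvGoC, pvAltGo, h]

-- ===== VERDICT (by name: the statement is the Claim_ definition above) =====
theorem get_LOC_entity_spec : Claim_equal_get_LOC_entity := by
  intro tag_seq char_seq _
  show _ = _
  have := pvFoldA_goC (tag_seq.zip char_seq) []
  simpa [get_LOC_entity, get_LOC_entity_alt, pvFinA, pvGoC] using this
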